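-- pv_equiv track=rewrite | github.com/fangxk2003/projectEuler | 1/p156.py | find
-- ===== SOURCE A (Python) =====
-- def func(n, d) :
--     strn = str(n)
--     cnt = 0
--     for i in range(len(strn)) :
--         if int(strn[i]) == d :
--             cnt += int('0' + strn[i+1:]) + 1
--         elif int(strn[i]) > d :
--             cnt += 10 ** (len(strn) - i - 1)
--         cnt += int('0' + strn[:i]) * 10 ** (len(strn) - i - 1)
--     return cnt
--
-- def find(l, r, d) :
--     if l == r : return l
--     res = 0
--     m = (l + r) // 2
--     if (func(m, d) >= l and func(l, d) <= m) :
--         res = find(l, m, d)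
--     if (func(r, d) >= m + 1 and func(m + 1, d) <= r) :
--         res += find(m + 1, r, d)
--     return res
-- ===== SOURCE B (Python) =====
-- def func(n, d) :
--     strn = str(n)
--     cnt = 0
--     for i in range(len(strn)) :
--         if int(strn[i]) == d :
--             cnt += int('0' + strn[i+1:]) + 1
--         elif int(strn[i]) > d :
--             cnt += 10 ** (len(strn) - i - 1)
--         cnt += int('0' + strn[:i]) * 10 ** (len(strn) - i - 1)
--     return cnt
--
-- def find(l, r, d):
--     # iterative: explicit stack of intervals, accumulator instead of recursion
--     total = 0
--     stack = [(l, r)]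
--     while stack:
--         a, b = stack.pop()
--         if a == b:
--             total += a
--             continue
--         m = (a + b) // 2
--         if func(m, d) >= a and func(a, d) <= m:
--             stack.append((a, m))
--         if func(b, d) >= m + 1 and func(m + 1, d) <= b:
--             stack.append((m + 1, b))
--     return total
-- ===== Notes on version B (the rewrite author's own statement) =====
-- stated objective: alternative
-- what changed: Replaced the recursive interval search by an iterative loop with an explicit stack of intervals and a single accumulator (func kept unchanged).
import Mathlib
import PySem

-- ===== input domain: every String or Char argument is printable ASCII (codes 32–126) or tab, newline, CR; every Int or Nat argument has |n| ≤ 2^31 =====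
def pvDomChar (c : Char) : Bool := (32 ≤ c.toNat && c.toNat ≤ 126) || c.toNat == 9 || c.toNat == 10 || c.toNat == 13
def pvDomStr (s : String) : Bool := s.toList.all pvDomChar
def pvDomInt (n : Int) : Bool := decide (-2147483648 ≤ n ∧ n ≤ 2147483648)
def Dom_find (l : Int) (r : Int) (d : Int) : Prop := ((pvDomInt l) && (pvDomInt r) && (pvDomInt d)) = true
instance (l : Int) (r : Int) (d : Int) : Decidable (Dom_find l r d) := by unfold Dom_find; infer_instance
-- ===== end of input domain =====

-- B replaces A's recursive interval search by an explicit stack of intervals with an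
-- accumulator (same prune tests, same func); objective: alternative decomposition.

-- ===== PORT A =====
-- int(c) for a single digit char; exact for '0'..'9' (all that occurs for n ≥ 0)
def digitInt (c : Char) : Int := (c.toNat : Int) - 48

-- int('0' + s) for a (possibly empty) string of digit chars; exact on digit strings
def digitsVal (cs : List Char) : Int := cs.foldl (fun a c => 10 * a + digitInt c) 0

-- literal port of func; str(n) via PySem.Int.toStr; exact for n ≥ 0 (only such calls arise under Pre_)
def func (n : Int) (d : Int) : Int :=
  let s := (PySem.Int.toStr n).toList
  let L := s.length
  (List.range L).foldl (fun cnt i =>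
    let di := digitInt (s.getD i ' ')
    let cnt :=
      if di = d then cnt + (digitsVal (s.drop (i+1)) + 1)
      else if di > d then cnt + 10 ^ (L - i - 1)
      else cnt
    cnt + digitsVal (s.take i) * 10 ^ (L - i - 1)) 0

-- A's recursion, with a fuel guard making it total (on l ≤ r the fuel covers the whole
-- recursion; on inverted ranges A's prune tests never fire and A returns 0, as the port does)
def findFuel (fuel : Nat) (l : Int) (r : Int) (d : Int) : Int :=
  match fuel with
  | 0 => 0
  | n + 1 =>
    if l = r then l
    else
      let m := PySem.Int.floordiv (l + r) 2
      let res := if func m d ≥ l ∧ func l d ≤ m then findFuel n l m d else 0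
      let res := if func r d ≥ m + 1 ∧ func (m + 1) d ≤ r then res + findFuel n (m + 1) r d else res
      res

def find (l : Int) (r : Int) (d : Int) : Int := findFuel ((r - l).toNat + 1) l r d

-- ===== PORT B =====
-- B's while-loop over an explicit stack (list head = top of stack), with a fuel guard
-- making it total (on l ≤ r the fuel covers the whole loop; on inverted ranges B pushes
-- nothing and returns 0, as the port does); acc is the running total.
def loopB (fuel : Nat) (d : Int) (stack : List (Int × Int)) (acc : Int) : Int :=
  match fuel, stack with
  | _, [] => acc
  | 0, _ => acc
  | n + 1, (a, b) :: rest =>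
    if a = b then loopB n d rest (acc + a)
    else
      let m := PySem.Int.floordiv (a + b) 2
      let st1 := if func m d ≥ a ∧ func a d ≤ m then (a, m) :: rest else rest
      let st2 := if func b d ≥ m + 1 ∧ func (m + 1) d ≤ b then (m + 1, b) :: st1 else st1
      loopB n d st2 acc

def find_alt (l : Int) (r : Int) (d : Int) : Int :=
  loopB (2 * (r - l).toNat + 1) d [(l, r)] 0

-- ===== PRECONDITION & SPEC =====
-- Pre_ excludes exactly the inputs where A raises ValueError: l ≠ r with l < 0 or r < 0
-- makes A call func on a negative number, and int('-…'[0]) raises.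
def Pre_find (l : Int) (r : Int) (d : Int) : Prop := l = r ∨ (0 ≤ l ∧ 0 ≤ r)
instance (l : Int) (r : Int) (d : Int) : Decidable (Pre_find l r d) := by unfold Pre_find; infer_instance
def pvWitness_find : Int × Int × Int := (5, 9, 1)

def Spec_find (l : Int) (r : Int) (d : Int) (out : Int) : Prop := out = find_alt l r d
instance (l : Int) (r : Int) (d : Int) (out : Int) : Decidable (Spec_find l r d out) := by unfold Spec_find; infer_instance

-- ===== CLAIM (what is proved, stated in full; the proofs are below) =====
def Claim_equal_find : Prop := ∀ (l : Int) (r : Int) (d : Int), Dom_find l r d → Pre_find l r d → Spec_find l r d (find l r d)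

-- ===== LEMMAS AND PROOFS =====

lemma mid_bounds {l r : Int} (h : l < r) :
    l ≤ PySem.Int.floordiv (l + r) 2 ∧ PySem.Int.floordiv (l + r) 2 < r := by
  have := PySem.Int.floordiv_eq_ediv_of_pos (a := l + r) (b := 2) (by omega)
  omega

-- ghost reference function: the common value of both ports on l ≤ r
def ghostG (l : Int) (r : Int) (d : Int) : Int :=
  if l = r then l
  else if r < l then 0
  else
    let m := PySem.Int.floordiv (l + r) 2
    (if func m d ≥ l ∧ func l d ≤ m then ghostG l m d else 0) +
    (if func r d ≥ m + 1 ∧ func (m + 1) d ≤ r then ghostG (m + 1) r d else 0)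
termination_by (r - l).toNat
decreasing_by
  all_goals
    have := mid_bounds (show l < r by omega)
    omega

lemma findFuel_eq_ghost (n : Nat) :
    ∀ l r d : Int, l ≤ r → (r - l).toNat < n → findFuel n l r d = ghostG l r d := by
  induction n with
  | zero => intro l r d _ h; omega
  | succ k ih =>
    intro l r d hle hn
    by_cases he : l = r
    · rw [findFuel, ghostG]; simp [he]
    · have hlt : l < r := lt_of_le_of_ne hle he
      obtain ⟨hm1, hm2⟩ := mid_bounds hlt
      have e1 : findFuel k l (PySem.Int.floordiv (l + r) 2) d
          = ghostG l (PySem.Int.floordiv (l + r) 2) d := ih _ _ _ (by omega) (by omega)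
      have e2 : findFuel k (PySem.Int.floordiv (l + r) 2 + 1) r d
          = ghostG (PySem.Int.floordiv (l + r) 2 + 1) r d := ih _ _ _ (by omega) (by omega)
      rw [findFuel, ghostG, if_neg he, if_neg he, if_neg (show ¬ r < l by omega)]
      simp only [e1, e2]
      split_ifs <;> ring

-- weight of a stack: an upper bound on the number of loop iterations it can cause
def stackW (st : List (Int × Int)) : Nat :=
  (st.map (fun p => 2 * (p.2 - p.1).toNat + 1)).sum

lemma stackW_cons (p : Int × Int) (st : List (Int × Int)) :
    stackW (p :: st) = 2 * (p.2 - p.1).toNat + 1 + stackW st := by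
  simp [stackW]

lemma loopB_eq_ghost (n : Nat) :
    ∀ (st : List (Int × Int)) (acc d : Int),
      (∀ p ∈ st, p.1 ≤ p.2) → stackW st ≤ n →
      loopB n d st acc = acc + (st.map (fun p => ghostG p.1 p.2 d)).sum := by
  induction n with
  | zero =>
    intro st acc d _ hw
    cases st with
    | nil => simp [loopB]
    | cons p rest => simp [stackW] at hw
  | succ k ih =>
    intro st acc d hle hw
    cases st with
    | nil => simp [loopB]
    | cons p rest =>
      obtain ⟨a, b⟩ := p
      have hab : a ≤ b := hle (a, b) (by simp)
      have hrest : ∀ p ∈ rest, p.1 ≤ p.2 := fun p hp => hle p (by simp [hp])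
      have hwc : 2 * (b - a).toNat + 1 + stackW rest ≤ k + 1 := by rw [stackW_cons] at hw; exact hw
      by_cases he : a = b
      · rw [loopB, if_pos he]
        rw [ih rest (acc + a) d hrest (by omega)]
        have hg : ghostG a b d = a := by rw [ghostG, if_pos he]
        simp only [List.map_cons, List.sum_cons, hg]
        ring
      · have hlt : a < b := lt_of_le_of_ne hab he
        obtain ⟨hm1, hm2⟩ := mid_bounds hlt
        rw [loopB, if_neg he]
        dsimp only
        simp only [List.map_cons, List.sum_cons]
        rw [ghostG, if_neg he, if_neg (show ¬ b < a by omega)]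
        dsimp only
        by_cases hc1 : func (PySem.Int.floordiv (a + b) 2) d ≥ a ∧
            func a d ≤ PySem.Int.floordiv (a + b) 2
        · by_cases hc2 : func b d ≥ PySem.Int.floordiv (a + b) 2 + 1 ∧
              func (PySem.Int.floordiv (a + b) 2 + 1) d ≤ b
          · rw [if_pos hc2, if_pos hc1, if_pos hc1, if_pos hc2]
            rw [ih _ acc d (by
                  intro p hp
                  simp only [List.mem_cons] at hp
                  rcases hp with h | h | h
                  · subst h; simp; omega
                  · subst h; simp; omega
                  · exact hrest p h)
                (by rw [stackW_cons, stackW_cons]; omega)]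
            simp only [List.map_cons, List.sum_cons]
            ring
          · rw [if_neg hc2, if_pos hc1, if_pos hc1, if_neg hc2]
            rw [ih _ acc d (by
                  intro p hp
                  simp only [List.mem_cons] at hp
                  rcases hp with h | h
                  · subst h; simp; omega
                  · exact hrest p h)
                (by rw [stackW_cons]; omega)]
            simp only [List.map_cons, List.sum_cons]
            ring
        · by_cases hc2 : func b d ≥ PySem.Int.floordiv (a + b) 2 + 1 ∧
              func (PySem.Int.floordiv (a + b) 2 + 1) d ≤ b
          · rw [if_pos hc2, if_neg hc1, if_neg hc1, if_pos hc2]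
            rw [ih _ acc d (by
                  intro p hp
                  simp only [List.mem_cons] at hp
                  rcases hp with h | h
                  · subst h; simp; omega
                  · exact hrest p h)
                (by rw [stackW_cons]; omega)]
            simp only [List.map_cons, List.sum_cons]
            ring
          · rw [if_neg hc2, if_neg hc1, if_neg hc1, if_neg hc2]
            rw [ih rest acc d hrest (by omega)]
            ring

lemma loopB_zero (d : Int) (st : List (Int × Int)) (acc : Int) : loopB 0 d st acc = acc := by
  cases st <;> rfl

lemma findFuel_one_ne {l r d : Int} (h : l ≠ r) : findFuel 1 l r d = 0 := by
  rw [findFuel, if_neg h]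
  dsimp only
  split_ifs <;> simp [findFuel]

lemma loopB_one_ne {a b acc d : Int} {rest : List (Int × Int)} (h : a ≠ b) :
    loopB 1 d ((a, b) :: rest) acc = acc := by
  rw [loopB, if_neg h]
  dsimp only
  split_ifs <;> simp [loopB_zero]

-- ===== VERDICT (by name: the statement is the Claim_ definition above) =====
theorem find_spec : Claim_equal_find := by
  intro l r d _ hpre
  by_cases hle : l ≤ r
  · unfold Spec_find find find_alt
    rw [findFuel_eq_ghost _ l r d hle (by omega)]
    rw [loopB_eq_ghost _ [(l, r)] 0 d (by simpa using hle) (by simp [stackW])]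
    simp
  · have hne : l ≠ r := by omega
    have h0 : (r - l).toNat = 0 := by omega
    unfold Spec_find find find_alt
    rw [h0]
    norm_num [findFuel_one_ne hne, loopB_one_ne hne]
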